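-- pv_equiv track=rewrite | github.com/gongahkia/kite | archive/v2-python/kite/utils/deduplication.py | normalize_case_name
-- ===== SOURCE A (Python) =====
-- def normalize_case_name(case_name: str) -> str:
--     """
--     Normalize case name for comparison.
--
--     Args:
--         case_name: Original case name
--
--     Returns:
--         Normalized case name
--     """
--     # Convert to lowercase
--     name = case_name.lower()
--
--     # Remove common punctuation
--     for char in [',', '.', ';', ':', '"', "'", '(', ')', '[', ']']:
--         name = name.replace(char, '')
--
--     # Normalize whitespace
--     name = ' '.join(name.split())
--
--     # Remove common legal terms that don't help identify uniqueness
--     stopwords = ['v', 'vs', 'versus', 'et', 'al', 'and', 'the', 'in', 're']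
--     words = name.split()
--     words = [w for w in words if w not in stopwords]
--
--     return ' '.join(words)
-- ===== SOURCE B (Python) =====
-- def normalize_case_name(case_name: str) -> str:
--     """Normalize case name with a single character-level state machine:
--     scan the string once, building the current word char by char (lowercasing,
--     skipping punctuation) and flushing it at whitespace unless empty/stopword."""
--     stopwords = frozenset(('v', 'vs', 'versus', 'et', 'al', 'and', 'the', 'in', 're'))
--     punct = frozenset(',.;:"\'()[]')
--     parts = []
--     cur = []
--     for ch in case_name:
--         c = ch.lower()
--         if c.isspace():
--             if cur:
--                 w = ''.join(cur)
--                 if w not in stopwords: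
--                     parts.append(w)
--                 cur = []
--         elif c not in punct:
--             cur.append(c)
--     if cur:
--         w = ''.join(cur)
--         if w not in stopwords:
--             parts.append(w)
--     return ' '.join(parts)
-- ===== Notes on version B (the rewrite author's own statement) =====
-- stated objective: alternative
-- what changed: B is a single character-level state machine: one scan of the input builds the current word char by char (lowercasing and skipping punctuation as it goes) and flushes it at whitespace unless empty or a stopword, replacing A's staged full-string passes (whole-string lower, ten .replace calls, split/join whitespace normalization, then a word filter).
import Mathlib
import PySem

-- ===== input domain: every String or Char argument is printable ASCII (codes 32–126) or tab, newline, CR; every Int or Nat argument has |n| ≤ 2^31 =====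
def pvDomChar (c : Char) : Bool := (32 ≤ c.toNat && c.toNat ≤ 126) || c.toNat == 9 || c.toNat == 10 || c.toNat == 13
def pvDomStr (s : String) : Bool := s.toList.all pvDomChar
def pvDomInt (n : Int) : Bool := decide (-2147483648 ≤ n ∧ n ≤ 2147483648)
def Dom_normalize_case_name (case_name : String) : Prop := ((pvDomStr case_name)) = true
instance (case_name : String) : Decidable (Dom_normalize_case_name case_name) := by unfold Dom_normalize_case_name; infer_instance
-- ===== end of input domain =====

-- B is a single character-level state machine (one scan building each word char by char,
-- flushing at whitespace) instead of A's staged full-string passes; same return value.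

-- ===== PORT A =====
def pvPuncts : List String := [",", ".", ";", ":", "\"", "'", "(", ")", "[", "]"]
def pvStop : List String := ["v", "vs", "versus", "et", "al", "and", "the", "in", "re"]

def normalize_case_name (case_name : String) : String :=
  let name := PySem.Str.lower case_name
  let name := pvPuncts.foldl (fun n ch => PySem.Str.replace n ch "") name
  let name := PySem.Str.join " " (PySem.Str.split₀ name)
  let words := PySem.Str.split₀ name
  let words := words.filter (fun w => !(pvStop.contains w))
  PySem.Str.join " " words

-- ===== PORT B =====
-- stopwords as char lists (B builds words as char lists during the scan)
def pvBStopL : List (List Char) :=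
  [['v'], ['v','s'], ['v','e','r','s','u','s'], ['e','t'], ['a','l'], ['a','n','d'], ['t','h','e'], ['i','n'], ['r','e']]
def pvBPunct : List Char := [',', '.', ';', ':', '"', '\'', '(', ')', '[', ']']

-- the flush at a word boundary: `if cur: w = ''.join(cur); if w not in stopwords: parts.append(w)`
def pvBFlush (parts : List (List Char)) (cur : List Char) : List (List Char) :=
  if cur.isEmpty then parts
  else if pvBStopL.contains cur then parts
  else parts ++ [cur]

-- one step of the scan: lowercase the char, flush at whitespace, skip punctuation, else extend cur
def pvBStep (st : List (List Char) × List Char) (ch : Char) : List (List Char) × List Char :=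
  let c := PySem.Chars.lowerChar ch
  if PySem.Chars.isspace c then (pvBFlush st.1 st.2, [])
  else if pvBPunct.contains c then st
  else (st.1, st.2 ++ [c])

def normalize_case_name_alt (case_name : String) : String :=
  let st := case_name.toList.foldl pvBStep ([], [])
  String.ofList (PySem.Chars.join [' '] (pvBFlush st.1 st.2))

-- ===== PRECONDITION & SPEC =====
def Spec_normalize_case_name (case_name : String) (out : String) : Prop := out = normalize_case_name_alt case_name
instance (case_name : String) (out : String) : Decidable (Spec_normalize_case_name case_name out) := by unfold Spec_normalize_case_name; infer_instance

-- ===== CLAIM (what is proved, stated in full; the proofs are below) =====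
def Claim_equal_normalize_case_name : Prop := ∀ (case_name : String), Dom_normalize_case_name case_name → Spec_normalize_case_name case_name (normalize_case_name case_name)

-- ===== LEMMAS AND PROOFS =====

-- whitespace test used by Python str.split()
def pvSp (c : Char) : Bool := PySem.Chars.isspace c
-- characters kept by the punctuation removal
def pvKeep (c : Char) : Bool := !(pvBPunct.contains c)
-- the test a word must pass to be kept (non-empty, not a stopword)
def pvQB (w : List Char) : Bool := !w.isEmpty && !(pvBStopL.contains w)
-- B's step on an already-lowercased char
def pvBStep0 (st : List (List Char) × List Char) (c : Char) : List (List Char) × List Char :=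
  if PySem.Chars.isspace c then (pvBFlush st.1 st.2, [])
  else if pvBPunct.contains c then st
  else (st.1, st.2 ++ [c])

theorem pv_modifyHead_id {α : Type} (l : List α) : l.modifyHead (fun x => x) = l := by
  cases l <;> simp

theorem pv_replace_go (c : Char) : ∀ (l : List Char) (fuel : Nat) (acc : List Char), l.length ≤ fuel →
    PySem.Chars.replace.go [c] [] fuel l acc = acc.reverse ++ l.filter (fun a => !(a == c)) := by
  intro l
  induction l with
  | nil =>
    intro fuel acc _
    cases fuel <;> simp [PySem.Chars.replace.go]
  | cons a t ih =>
    intro fuel acc h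
    cases fuel with
    | zero => simp at h
    | succ f =>
      rw [PySem.Chars.replace.go]
      by_cases hca : c = a
      · subst hca
        simp [List.isPrefixOf, ih f _ (by simpa using h)]
      · have hb : (c == a) = false := by simp [hca]
        simp [List.isPrefixOf, hb, ih f _ (by simpa using h), Ne.symm hca]

theorem pv_replace_single (c : Char) (s : List Char) :
    PySem.Chars.replace s [c] [] = s.filter (fun a => !(a == c)) := by
  rw [PySem.Chars.replace]
  simp [pv_replace_go c s s.length [] le_rfl]

theorem pv_split0_go (s : List Char) : ∀ (cur : List Char) (acc : List (List Char)),
    PySem.Chars.split₀.go s cur acc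
      = acc.reverse ++ ((List.splitOnP pvSp s).modifyHead (fun w => cur.reverse ++ w)).filter (fun w => !w.isEmpty) := by
  induction s with
  | nil =>
    intro cur acc
    rw [PySem.Chars.split₀.go]
    cases hc : cur.isEmpty <;>
      simp_all [List.splitOnP_nil, List.isEmpty_iff, List.isEmpty_eq_false_iff]
  | cons c rest ih =>
    intro cur acc
    rw [PySem.Chars.split₀.go, List.splitOnP_cons]
    by_cases hsp : pvSp c
    · rw [if_pos (show (PySem.Chars.isspace c) = true from hsp), if_pos hsp]
      cases hc : cur.isEmpty
      · rw [if_neg (by exact Bool.false_ne_true)]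
        rw [ih [] (cur.reverse :: acc)]
        simp [List.isEmpty_eq_false_iff.mp hc, pv_modifyHead_id]
      · rw [if_pos (by simp_all)]
        rw [ih [] acc]
        simp [List.isEmpty_iff.mp hc, pv_modifyHead_id]
    · rw [if_neg (by simpa using hsp), if_neg hsp]
      rw [ih (c :: cur) acc]
      congr 1
      rw [List.modifyHead_modifyHead]
      have hf : (fun w => (c :: cur).reverse ++ w) = ((fun w => cur.reverse ++ w) ∘ List.cons c) := by
        funext w; simp
      rw [hf]

theorem pv_split0_eq (s : List Char) :
    PySem.Chars.split₀ s = (List.splitOnP pvSp s).filter (fun w => !w.isEmpty) := by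
  rw [PySem.Chars.split₀, pv_split0_go]
  simp [pv_modifyHead_id]

theorem pv_mem_splitOnP : ∀ (l : List Char) (w : List Char), w ∈ List.splitOnP pvSp l → ∀ c ∈ w, pvSp c = false := by
  intro l
  induction l with
  | nil => intro w hw; simp [List.splitOnP_nil] at hw; simp [hw]
  | cons a t ih =>
    intro w hw
    rw [List.splitOnP_cons] at hw
    by_cases hsp : pvSp a
    · rw [if_pos hsp] at hw
      rcases List.mem_cons.mp hw with h | h
      · simp [h]
      · exact ih w h
    · rw [if_neg hsp] at hw
      obtain ⟨h0, t0, he⟩ := List.exists_cons_of_ne_nil (List.splitOnP_ne_nil pvSp t)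
      rw [he] at hw
      simp only [List.modifyHead_cons] at hw
      rcases List.mem_cons.mp hw with h | h
      · subst h
        intro c hc
        rcases List.mem_cons.mp hc with rfl | hc
        · simpa using hsp
        · exact ih h0 (by rw [he]; exact List.mem_cons_self) c hc
      · exact ih w (by rw [he]; exact List.mem_cons_of_mem _ h)

theorem pv_splitOnP_prefix (w : List Char) (l : List Char) (h : ∀ c ∈ w, pvSp c = false) :
    List.splitOnP pvSp (w ++ l) = (List.splitOnP pvSp l).modifyHead (fun x => w ++ x) := by
  induction w with
  | nil => simp [pv_modifyHead_id]
  | cons a t ih =>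
    have ha : pvSp a = false := h a List.mem_cons_self
    rw [List.cons_append, List.splitOnP_cons, if_neg (by simp [ha]),
        ih (fun c hc => h c (List.mem_cons_of_mem _ hc)), List.modifyHead_modifyHead]
    congr 1

-- a whitespace char is never one of the deleted punctuation chars
theorem pv_sp_keep (c : Char) (hsp : pvSp c = true) : pvKeep c = true := by
  cases hk : pvKeep c
  · exfalso
    rw [pvKeep, pvBPunct, Bool.not_eq_false', List.contains_eq_mem, decide_eq_true_iff] at hk
    simp only [List.mem_cons, List.not_mem_nil, or_false] at hk
    rcases hk with rfl | rfl | rfl | rfl | rfl | rfl | rfl | rfl | rfl | rfl <;>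
      simp [pvSp, PySem.Chars.isspace] at hsp
  · rfl

theorem pv_split0_join : ∀ (ws : List (List Char)), (∀ w ∈ ws, w.isEmpty = false) →
    (∀ w ∈ ws, ∀ c ∈ w, pvSp c = false) →
    PySem.Chars.split₀ (PySem.Chars.join [' '] ws) = ws := by
  intro ws
  induction ws with
  | nil => intro _ _; rw [PySem.Chars.join]; simp [List.intercalate, pv_split0_eq, List.splitOnP_nil]
  | cons a ws ih =>
    intro hne hsp
    cases ws with
    | nil =>
      rw [PySem.Chars.join]
      have h1 : List.intercalate [' '] [a] = a := by simp [List.intercalate]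
      rw [h1]
      rw [pv_split0_eq, List.splitOnP_eq_single _ _ (by
        intro x hx
        simp [hsp a List.mem_cons_self x hx])]
      simp [hne a List.mem_cons_self]
    | cons b ws' =>
      rw [PySem.Chars.join] at *
      have hstep : List.intercalate [' '] (a :: b :: ws') = a ++ ' ' :: List.intercalate [' '] (b :: ws') := by
        simp [List.intercalate, List.intersperse_cons₂]
      rw [hstep, pv_split0_eq, pv_splitOnP_prefix a _ (hsp a List.mem_cons_self),
          List.splitOnP_cons]
      have hspc : pvSp ' ' = true := by decide
      rw [if_pos hspc]
      simp only [List.modifyHead_cons, List.append_nil]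
      rw [List.filter_cons_of_pos (by simp [hne a List.mem_cons_self])]
      have ihh := ih (fun w hw => hne w (List.mem_cons_of_mem _ hw))
        (fun w hw => hsp w (List.mem_cons_of_mem _ hw))
      rw [pv_split0_eq] at ihh
      rw [ihh]

theorem pv_fold_replace (s : String) :
    (pvPuncts.foldl (fun n ch => PySem.Str.replace n ch "") s).toList = s.toList.filter pvKeep := by
  simp only [pvPuncts, List.foldl_cons, List.foldl_nil, PySem.Str.toList_replace,
    show ("," : String).toList = [','] from rfl,
    show ("." : String).toList = ['.'] from rfl,
    show (";" : String).toList = [';'] from rfl,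
    show (":" : String).toList = [':'] from rfl,
    show ("\"" : String).toList = ['"'] from rfl,
    show ("'" : String).toList = ['\''] from rfl,
    show ("(" : String).toList = ['('] from rfl,
    show (")" : String).toList = [')'] from rfl,
    show ("[" : String).toList = ['['] from rfl,
    show ("]" : String).toList = [']'] from rfl,
    show ("" : String).toList = [] from rfl,
    pv_replace_single, List.filter_filter]
  apply List.filter_congr
  intro a _
  by_cases h : a ∈ pvBPunct
  · have hk : pvKeep a = false := by simp [pvKeep, h]
    rw [hk]
    simp only [pvBPunct, List.mem_cons, List.not_mem_nil, or_false] at h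
    rcases h with rfl | rfl | rfl | rfl | rfl | rfl | rfl | rfl | rfl | rfl <;> decide
  · have hk : pvKeep a = true := by simp [pvKeep, h]
    rw [hk]
    simp only [pvBPunct, List.mem_cons, List.not_mem_nil, or_false, not_or] at h
    obtain ⟨h1, h2, h3, h4, h5, h6, h7, h8, h9, h10⟩ := h
    simp [beq_eq_false_iff_ne, h1, h2, h3, h4, h5, h6, h7, h8, h9, h10]

theorem pv_str_beq (w v : String) : (w == v) = (w.toList == v.toList) := by
  rw [Bool.eq_iff_iff]
  simp [String.toList_inj]

theorem pv_stop_str (w : String) : (pvStop.contains w) = (pvBStopL.contains w.toList) := by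
  simp only [pvStop, pvBStopL, List.contains_cons, List.contains_nil, pv_str_beq]
  rfl

theorem pv_map_toList_filter (pS : String → Bool) (pL : List Char → Bool)
    (h : ∀ w, pS w = pL w.toList) (l : List String) :
    (l.filter pS).map String.toList = (l.map String.toList).filter pL := by
  rw [List.filter_map]
  congr 1
  apply List.filter_congr
  intro w _
  simp [Function.comp, h]

-- the flush is append-of-the-kept-word
theorem pv_flush_eq (parts : List (List Char)) (cur : List Char) :
    pvBFlush parts cur = parts ++ (if pvQB cur then [cur] else []) := by
  unfold pvBFlush pvQB
  by_cases h1 : cur.isEmpty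
  · simp [h1]
  · by_cases h2 : cur ∈ pvBStopL <;> simp [h1, h2, List.contains_eq_mem]

-- the scan invariant: scanning l starting from (parts, cur) and flushing at the end
-- yields parts followed by the kept words of the remaining text (cur glued to l's first word)
theorem pv_scan : ∀ (l : List Char) (parts : List (List Char)) (cur : List Char),
    (let st := l.foldl pvBStep0 (parts, cur); pvBFlush st.1 st.2)
      = parts ++ ((List.splitOnP pvSp (l.filter pvKeep)).modifyHead (fun w => cur ++ w)).filter pvQB := by
  intro l
  induction l with
  | nil =>
    intro parts cur
    simp only [List.foldl_nil, pv_flush_eq]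
    cases hq : pvQB cur <;> simp [List.filter, hq]
  | cons c t ih =>
    intro parts cur
    simp only [List.foldl_cons]
    by_cases hsp : PySem.Chars.isspace c
    · have hk : pvKeep c = true := pv_sp_keep c (by simpa [pvSp] using hsp)
      have hstep : pvBStep0 (parts, cur) c = (pvBFlush parts cur, []) := by
        simp [pvBStep0, hsp]
      rw [hstep, ih (pvBFlush parts cur) []]
      rw [List.filter_cons_of_pos hk, List.splitOnP_cons, if_pos (show pvSp c from by simpa [pvSp] using hsp)]
      simp only [List.modifyHead_cons, List.nil_append, List.append_nil, List.filter_cons]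
      rw [pv_flush_eq, pv_modifyHead_id]
      cases hq : pvQB cur <;> simp
    · by_cases hpc : c ∈ pvBPunct
      · have hk : pvKeep c = false := by simp [pvKeep, List.contains_eq_mem, hpc]
        have hstep : pvBStep0 (parts, cur) c = (parts, cur) := by
          simp [pvBStep0, hsp, List.contains_eq_mem, hpc]
        rw [hstep, ih parts cur, List.filter_cons_of_neg (by simp [hk])]
      · have hk : pvKeep c = true := by simp [pvKeep, List.contains_eq_mem, hpc]
        have hstep : pvBStep0 (parts, cur) c = (parts, cur ++ [c]) := by
          simp [pvBStep0, hsp, List.contains_eq_mem, hpc]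
        rw [hstep, ih parts (cur ++ [c]), List.filter_cons_of_pos hk,
            List.splitOnP_cons, if_neg (show ¬ pvSp c = true from by simpa [pvSp] using hsp)]
        rw [List.modifyHead_modifyHead]
        congr 3
        funext w
        simp

theorem pv_main (s : String) : normalize_case_name s = normalize_case_name_alt s := by
  apply String.toList_inj.mp
  rw [normalize_case_name, normalize_case_name_alt]
  -- ===== A side: reduce to join over the filtered words of the cleaned lowered text =====
  have h1 : (pvPuncts.foldl (fun n ch => PySem.Str.replace n ch "") (PySem.Str.lower s)).toList
      = (PySem.Str.lower s).toList.filter pvKeep := pv_fold_replace _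
  have h2 : (PySem.Str.split₀ (pvPuncts.foldl (fun n ch => PySem.Str.replace n ch "") (PySem.Str.lower s))).map String.toList
      = PySem.Chars.split₀ ((PySem.Str.lower s).toList.filter pvKeep) := by
    rw [PySem.Str.split₀_map_toList, h1]
  have hWne : ∀ w ∈ PySem.Chars.split₀ ((PySem.Str.lower s).toList.filter pvKeep), w.isEmpty = false := by
    intro w hw
    rw [pv_split0_eq] at hw
    have := (List.mem_filter.mp hw).2
    simpa using this
  have hWsp : ∀ w ∈ PySem.Chars.split₀ ((PySem.Str.lower s).toList.filter pvKeep), ∀ c ∈ w, pvSp c = false := by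
    intro w hw
    rw [pv_split0_eq] at hw
    exact pv_mem_splitOnP _ w (List.mem_filter.mp hw).1
  have h3 : (PySem.Str.join " " (PySem.Str.split₀ (pvPuncts.foldl (fun n ch => PySem.Str.replace n ch "") (PySem.Str.lower s)))).toList
      = PySem.Chars.join [' '] (PySem.Chars.split₀ ((PySem.Str.lower s).toList.filter pvKeep)) := by
    rw [PySem.Str.toList_join, h2]
    rfl
  have h4 : (PySem.Str.split₀ (PySem.Str.join " " (PySem.Str.split₀ (pvPuncts.foldl (fun n ch => PySem.Str.replace n ch "") (PySem.Str.lower s))))).map String.toList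
      = PySem.Chars.split₀ ((PySem.Str.lower s).toList.filter pvKeep) := by
    rw [PySem.Str.split₀_map_toList, h3, pv_split0_join _ hWne hWsp]
  rw [PySem.Str.toList_join]
  rw [pv_map_toList_filter (fun w => !(pvStop.contains w)) (fun w => !(pvBStopL.contains w))
        (fun w => by show (!(pvStop.contains w)) = !(pvBStopL.contains w.toList); rw [pv_stop_str]) _, h4]
  -- ===== B side: the scan invariant =====
  rw [String.toList_ofList]
  have hlow : (PySem.Str.lower s).toList = s.toList.map PySem.Chars.lowerChar := by
    rw [PySem.Str.toList_lower]; rfl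
  have hfold : s.toList.foldl pvBStep ([], [])
      = (s.toList.map PySem.Chars.lowerChar).foldl pvBStep0 ([], []) := by
    rw [List.foldl_map]; rfl
  rw [hfold]
  have hscan := pv_scan (s.toList.map PySem.Chars.lowerChar) [] []
  simp only [List.nil_append] at hscan
  rw [hscan, pv_modifyHead_id, ← hlow]
  rw [String.toList_ofList, pv_split0_eq, List.filter_filter]
  refine congrArg (PySem.Chars.join [' ']) (List.filter_congr ?_)
  intro w _
  simp [pvQB, Bool.and_comm]

-- ===== VERDICT (by name: the statement is the Claim_ definition above) =====
theorem normalize_case_name_spec : Claim_equal_normalize_case_name := by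
  intro s _
  unfold Spec_normalize_case_name
  exact pv_main s
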